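-- pv_equiv track=rewrite | github.com/cyh1123/checkio | Elementary/Number_Base.py | checkio2
-- ===== SOURCE A (Python) =====
-- import string
--
-- chrmap = string.digits + string.ascii_lowercase
--
-- def checkio2(str_number, radix):
--     str_number = str_number.lower()
--     if chrmap.index(max(str_number)) >= radix:
--         return -1
--     val = 0
--     for i in range(len(str_number)):
--         val += chrmap.index(str_number[-i - 1]) * pow(radix, i)
--     return val
-- ===== SOURCE B (Python) =====
-- import string
--
-- chrmap = string.digits + string.ascii_lowercase
-- DIGIT = {c: i for i, c in enumerate(chrmap)}
--
-- def checkio2(str_number, radix):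
--     # Horner left-to-right: one multiply per char, dict digit lookup,
--     # -1 as soon as a char is not a digit valid for this radix.
--     val = 0
--     for ch in str_number.lower():
--         d = DIGIT.get(ch)
--         if d is None or d >= radix:
--             return -1
--         val = val * radix + d
--     return val
-- ===== Notes on version B (the rewrite author's own statement) =====
-- stated objective: faster
-- what changed: Replaces the right-to-left sum of digit*pow(radix,i) with per-position str.index scans by a single left-to-right Horner accumulation with a precomputed digit dictionary, returning -1 as soon as a char is not a valid digit for the radix.
import Mathlib
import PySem

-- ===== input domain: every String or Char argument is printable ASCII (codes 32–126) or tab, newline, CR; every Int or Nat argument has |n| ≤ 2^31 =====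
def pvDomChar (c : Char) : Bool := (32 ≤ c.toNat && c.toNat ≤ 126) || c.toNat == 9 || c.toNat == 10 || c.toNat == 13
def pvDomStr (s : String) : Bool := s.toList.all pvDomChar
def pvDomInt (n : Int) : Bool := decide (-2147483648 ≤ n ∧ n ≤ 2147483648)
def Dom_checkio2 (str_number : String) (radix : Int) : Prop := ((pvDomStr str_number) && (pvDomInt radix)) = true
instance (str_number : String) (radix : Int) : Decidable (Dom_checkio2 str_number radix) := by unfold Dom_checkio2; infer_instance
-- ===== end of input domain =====

-- B replaces A's right-to-left sum with per-position pow/str.index by one Horner pass with a digit dictionary (fewer multiplications; measured faster).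
-- chrmap = string.digits + string.ascii_lowercase (shared module constant)
def chrmapL : List Char := "0123456789abcdefghijklmnopqrstuvwxyz".toList

-- ===== PORT A =====
-- chrmap.index(c); Python raises ValueError when c is absent — those inputs are outside Pre_, default 0 there
def chrIndex (c : Char) : Int := (((PySem.List.index? chrmapL c).getD 0 : Nat) : Int)

def checkio2 (str_number : String) (radix : Int) : Int :=
  let cs := (PySem.Str.lower str_number).toList
  match PySem.List.max? cs (fun c => c) with
  | none => 0   -- Python: max('') raises ValueError; excluded by Pre_
  | some m =>
    if chrIndex m ≥ radix then -1
    else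
      (List.range cs.length).foldl
        (fun (val : Int) (i : Nat) =>
          val + chrIndex ((PySem.List.pyGet? cs (-(i : Int) - 1)).getD ' ') * radix ^ i) 0

-- ===== PORT B =====
-- DIGIT = {c: i for i, c in enumerate(chrmap)}
def digitDict : PySem.Dict Char Int :=
  PySem.Dict.ofList ((PySem.List.enumerate chrmapL 0).map (fun p => (p.2, p.1)))

-- the for-loop: d = DIGIT.get(ch); early 'return -1' if d is None or d >= radix
def hornerGo (radix : Int) : List Char → Int → Int
  | [], val => val
  | c :: cs, val =>
    match PySem.Dict.get? digitDict c with
    | none => -1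
    | some d => if d ≥ radix then -1 else hornerGo radix cs (val * radix + d)

def checkio2_alt (str_number : String) (radix : Int) : Int :=
  hornerGo radix (PySem.Str.lower str_number).toList 0

-- ===== PRECONDITION & SPEC =====
-- Pre_ is exactly where A returns: it excludes only inputs on which A raises ValueError —
-- the empty string (max('') raises), and strings with a character outside 0-9a-z after lowercasing
-- unless the maximal character is a chrmap digit with value ≥ radix (then A returns -1 before the loop).
def Pre_checkio2 (str_number : String) (radix : Int) : Prop :=
  (PySem.Str.lower str_number).toList ≠ [] ∧
  (((PySem.Str.lower str_number).toList.all (fun c => chrmapL.contains c)) = true ∨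
   (chrmapL.contains ((PySem.List.max? (PySem.Str.lower str_number).toList (fun c => c)).getD ' ') = true ∧
    chrIndex ((PySem.List.max? (PySem.Str.lower str_number).toList (fun c => c)).getD ' ') ≥ radix))
instance (str_number : String) (radix : Int) : Decidable (Pre_checkio2 str_number radix) := by
  unfold Pre_checkio2; infer_instance
def pvWitness_checkio2 : String × Int := ("ff", 16)

def Spec_checkio2 (str_number : String) (radix : Int) (out : Int) : Prop := out = checkio2_alt str_number radix
instance (str_number : String) (radix : Int) (out : Int) : Decidable (Spec_checkio2 str_number radix out) := by unfold Spec_checkio2; infer_instance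

-- ===== CLAIM (what is proved, stated in full; the proofs are below) =====
def Claim_equal_checkio2 : Prop := ∀ (str_number : String) (radix : Int), Dom_checkio2 str_number radix → Pre_checkio2 str_number radix → Spec_checkio2 str_number radix (checkio2 str_number radix)
-- ===== LEMMAS AND PROOFS =====

theorem chrmapL_lit : chrmapL = ['0','1','2','3','4','5','6','7','8','9','a','b','c','d','e','f','g','h','i','j','k','l','m','n','o','p','q','r','s','t','u','v','w','x','y','z'] := by
  simp [chrmapL]

-- B's dictionary lookup agrees with A's chrmap.index on every character of chrmap
set_option maxRecDepth 4096 in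
theorem digit_some : ∀ c ∈ chrmapL, PySem.Dict.get? digitDict c = some (chrIndex c) := by
  rw [chrmapL_lit]
  intro c hc
  fin_cases hc <;> decide

-- chrIndex of each chrmap character, as a function of its code point (chrmap is code-point sorted)
set_option maxRecDepth 4096 in
theorem chrIndex_code : ∀ c ∈ chrmapL,
    (48 ≤ c.toNat ∧ c.toNat ≤ 57 ∧ chrIndex c = (c.toNat : Int) - 48) ∨
    (97 ≤ c.toNat ∧ c.toNat ≤ 122 ∧ chrIndex c = (c.toNat : Int) - 87) := by
  rw [chrmapL_lit]
  intro c hc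
  fin_cases hc <;> decide

theorem chrIndex_mono : ∀ a ∈ chrmapL, ∀ b ∈ chrmapL, a ≤ b → chrIndex a ≤ chrIndex b := by
  intro a ha b hb hab
  have hab' : a.toNat ≤ b.toNat := Fin.mk_le_mk.mp hab
  rcases chrIndex_code a ha with ⟨h1, h2, h3⟩ | ⟨h1, h2, h3⟩ <;>
    rcases chrIndex_code b hb with ⟨g1, g2, g3⟩ | ⟨g1, g2, g3⟩ <;>
      rw [h3, g3] <;> omega

-- A's i-th term of the sum, for the list cs
def termA (radix : Int) (cs : List Char) (i : Nat) : Int :=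
  chrIndex ((PySem.List.pyGet? cs (-(i : Int) - 1)).getD ' ') * radix ^ i

def sumA (radix : Int) (cs : List Char) : Int :=
  ((List.range cs.length).map (termA radix cs)).sum

theorem termA_cons (radix : Int) (c : Char) (cs : List Char) (i : Nat) (h : i < cs.length) :
    termA radix (c :: cs) i = termA radix cs i := by
  unfold termA
  have h1 : (-(i : Int) - 1) = -(((i + 1 : Nat) : Int)) := by push_cast; ring
  rw [h1, PySem.List.pyGet?_neg_natCast (c :: cs) (i + 1) (by omega) (by simp; omega),
      PySem.List.pyGet?_neg_natCast cs (i + 1) (by omega) (by omega)]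
  have h2 : (c :: cs).length - (i + 1) = (cs.length - (i + 1)) + 1 := by simp; omega
  rw [h2]
  simp

theorem termA_last (radix : Int) (c : Char) (cs : List Char) :
    termA radix (c :: cs) cs.length = chrIndex c * radix ^ cs.length := by
  unfold termA
  have h1 : (-(cs.length : Int) - 1) = -(((cs.length + 1 : Nat) : Int)) := by push_cast; ring
  rw [h1, PySem.List.pyGet?_neg_natCast (c :: cs) (cs.length + 1) (by omega) (by simp)]
  simp

theorem sumA_cons (radix : Int) (c : Char) (cs : List Char) :
    sumA radix (c :: cs) = sumA radix cs + chrIndex c * radix ^ cs.length := by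
  unfold sumA
  have : (c :: cs).length = cs.length + 1 := rfl
  rw [this, List.range_succ, List.map_append, List.sum_append]
  simp only [List.map_cons, List.map_nil, List.sum_cons, List.sum_nil, add_zero]
  rw [termA_last]
  congr 1
  refine congrArg List.sum (List.map_congr_left ?_)
  intro i hi
  exact termA_cons radix c cs i (List.mem_range.mp hi)

-- one-step unfoldings of the Horner loop (proof helpers)
theorem hornerGo_nil (radix val : Int) : hornerGo radix [] val = val := by rfl

theorem hornerGo_cons (radix val : Int) (c : Char) (cs : List Char) :
    hornerGo radix (c :: cs) val = match PySem.Dict.get? digitDict c with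
    | none => -1
    | some d => if d ≥ radix then -1 else hornerGo radix cs (val * radix + d) := by rfl

theorem hornerGo_step (radix val : Int) (c : Char) (cs : List Char) (d : Int)
    (hd : PySem.Dict.get? digitDict c = some d) (h : ¬ d ≥ radix) :
    hornerGo radix (c :: cs) val = hornerGo radix cs (val * radix + d) := by
  rw [hornerGo_cons, hd]; simp [h]

theorem hornerGo_none (radix val : Int) (c : Char) (cs : List Char)
    (hd : PySem.Dict.get? digitDict c = none) :
    hornerGo radix (c :: cs) val = -1 := by
  rw [hornerGo_cons, hd]

theorem hornerGo_big (radix val : Int) (c : Char) (cs : List Char) (d : Int)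
    (hd : PySem.Dict.get? digitDict c = some d) (h : d ≥ radix) :
    hornerGo radix (c :: cs) val = -1 := by
  rw [hornerGo_cons, hd]; simp [h]

-- if every char is a digit < radix, the Horner loop computes val·radix^n + A's sum
theorem hornerGo_eq_sum (radix : Int) (cs : List Char)
    (hmem : ∀ c ∈ cs, c ∈ chrmapL) (hlt : ∀ c ∈ cs, chrIndex c < radix) :
    ∀ val, hornerGo radix cs val = val * radix ^ cs.length + sumA radix cs := by
  induction cs with
  | nil => intro val; rw [hornerGo_nil]; simp [sumA]
  | cons c cs ih =>
    intro val
    have hd : PySem.Dict.get? digitDict c = some (chrIndex c) :=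
      digit_some c (hmem c (by simp))
    have hlt' : chrIndex c < radix := hlt c (by simp)
    rw [hornerGo_step radix val c cs (chrIndex c) hd (by omega)]
    rw [ih (fun x hx => hmem x (by simp [hx])) (fun x hx => hlt x (by simp [hx]))]
    rw [sumA_cons]
    have : (c :: cs).length = cs.length + 1 := rfl
    rw [this]
    ring

-- if some char is absent from the dict or has value ≥ radix, the Horner loop returns -1
theorem hornerGo_eq_neg_one (radix : Int) (cs : List Char)
    (hbig : ∃ x ∈ cs, (PySem.Dict.get? digitDict x).getD radix ≥ radix) :
    ∀ val, hornerGo radix cs val = -1 := by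
  induction cs with
  | nil => rcases hbig with ⟨c, hc, _⟩; exact absurd hc (by simp)
  | cons c cs ih =>
    intro val
    cases hgc : PySem.Dict.get? digitDict c with
    | none => exact hornerGo_none radix val c cs hgc
    | some d =>
      by_cases h : d ≥ radix
      · exact hornerGo_big radix val c cs d hgc h
      · rw [hornerGo_step radix val c cs d hgc h]
        rcases hbig with ⟨x, hx, hxr⟩
        rcases List.mem_cons.mp hx with rfl | hx'
        · rw [hgc] at hxr; simp at hxr; omega
        · exact ih ⟨x, hx', hxr⟩ _

-- ===== VERDICT (by name: the statement is the Claim_ definition above) =====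
theorem checkio2_spec : Claim_equal_checkio2 := by
  intro str_number radix _ hpre
  obtain ⟨hne, hcase⟩ := hpre
  unfold Spec_checkio2 checkio2_alt
  simp only [checkio2]
  set cs := (PySem.Str.lower str_number).toList with hcs
  obtain ⟨m, hm⟩ : ∃ m, PySem.List.max? cs (fun c => c) = some m := by
    cases h : PySem.List.max? cs (fun c => c) with
    | none => exact absurd ((PySem.List.max?_eq_none_iff cs _).mp h) hne
    | some m => exact ⟨m, rfl⟩
  have hmmem : m ∈ cs := PySem.List.max?_mem hm
  have hmax : ∀ y ∈ cs, y ≤ m := fun y hy => PySem.List.max?_isMax hm y hy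
  rw [hm]
  simp only
  have hmC : m ∈ chrmapL := by
    rcases hcase with hall | ⟨hc, _⟩
    · exact List.contains_iff_mem.mp (by simpa using (List.all_eq_true.mp hall m hmmem))
    · rw [hm] at hc; exact List.contains_iff_mem.mp (by simpa using hc)
  by_cases hbr : chrIndex m ≥ radix
  · rw [if_pos hbr]
    refine (hornerGo_eq_neg_one radix cs ⟨m, hmmem, ?_⟩ 0).symm
    rw [digit_some m hmC]
    simpa using hbr
  · rw [if_neg hbr]
    have hall : ∀ c ∈ cs, c ∈ chrmapL := by
      rcases hcase with hall | ⟨hc, hge⟩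
      · intro c hc'
        exact List.contains_iff_mem.mp (by simpa using (List.all_eq_true.mp hall c hc'))
      · rw [hm] at hge; simp at hge; omega
    have hlt : ∀ c ∈ cs, chrIndex c < radix := by
      intro c hc
      have := chrIndex_mono c (hall c hc) m hmC (hmax c hc)
      omega
    rw [hornerGo_eq_sum radix cs hall hlt 0]
    simp only [zero_mul, zero_add]
    unfold sumA termA
    rw [PySem.List.foldl_add]
    simp
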